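-- pv_equiv track=rewrite | github.com/Derint/Music-Player | code/Helper_file.py | search_algo
-- ===== SOURCE A (Python) =====
-- def search_algo(query, url_fn_dict):
--     audio_names = []
--     for fn in url_fn_dict:
--         l=0
--         qsplit = query.split()
--         for q in qsplit:
--             try:
--                 if len(qsplit)>1:
--                     float(q)
--             except:
--                 pass
--             if [_ for _ in fn.lower().split() if q in _]:
--                 l+=1
--             if len(qsplit)>1 and l>1:
--                 audio_names.append(url_fn_dict[fn]['path'])
--             elif len(qsplit)==1 and l>0:
--                 audio_names.append(url_fn_dict[fn]['path'])
--     return list(set(audio_names))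
-- ===== SOURCE B (Python) =====
-- def search_algo(query, url_fn_dict):
--     # Inverted pass: one match-set of filenames per query word, then set algebra
--     # (single pass of pairwise-overlap accumulation) instead of per-file counting.
--     qsplit = query.split()
--     word_sets = []
--     for q in qsplit:
--         word_sets.append({fn for fn in url_fn_dict
--                           if any(q in w for w in fn.lower().split())})
--     if len(qsplit) == 1:
--         chosen = word_sets[0]
--     else:
--         chosen = set()
--         seen = set()
--         for s in word_sets:
--             chosen |= s & seen   # files already matched by an earlier word
--             seen |= s
--     return list({url_fn_dict[fn]['path'] for fn in url_fn_dict if fn in chosen})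
-- ===== Notes on version B (the rewrite author's own statement) =====
-- stated objective: faster
-- what changed: A counts per-file matches in a nested per-file/per-query-word loop that re-splits the query and re-lowercases/re-splits the filename on every iteration, appending the path repeatedly and deduplicating at the end; B inverts the traversal: it builds one set of matching filenames per query word, combines these sets with set algebra (a single pass accumulating pairwise overlaps chosen |= s & seen, or the sole match set for a one-word query), then collects the paths of the chosen filenames.
import Mathlib
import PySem

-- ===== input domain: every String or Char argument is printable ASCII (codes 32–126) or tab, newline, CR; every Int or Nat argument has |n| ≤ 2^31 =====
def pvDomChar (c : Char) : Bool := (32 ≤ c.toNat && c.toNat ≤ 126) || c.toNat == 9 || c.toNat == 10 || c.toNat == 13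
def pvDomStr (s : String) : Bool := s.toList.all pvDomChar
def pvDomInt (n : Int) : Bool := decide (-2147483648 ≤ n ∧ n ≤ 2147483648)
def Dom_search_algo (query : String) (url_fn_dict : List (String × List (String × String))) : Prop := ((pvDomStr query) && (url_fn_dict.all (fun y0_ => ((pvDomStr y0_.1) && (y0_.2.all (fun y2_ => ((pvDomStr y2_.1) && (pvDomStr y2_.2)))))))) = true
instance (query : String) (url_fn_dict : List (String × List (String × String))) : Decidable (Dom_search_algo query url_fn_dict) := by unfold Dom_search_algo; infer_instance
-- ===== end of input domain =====

-- B inverts the traversal: one match set of filenames per query word, combined by set algebra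
-- (pairwise-overlap accumulation), instead of A's per-file match counter with repeated appends; a timing run measured B faster (objective: faster).
-- Both programs return a list built from a Python set; its order is hash-dependent, so the result is compared as a set.

-- ===== PORT A =====
-- Literal port of A. The `try: float(q) except: pass` block is a no-op and has no porting target.
-- Python's `if [...]:` truthiness on the comprehension is `filter ... ≠ []`.
def search_algo (query : String) (url_fn_dict : List (String × List (String × String))) : List String :=
  let audio_names : List String :=
    url_fn_dict.foldl (fun acc fnp =>
      let qsplit := PySem.Str.split₀ query
      (qsplit.foldl (fun (st : Nat × List String) q =>
        let l := if ((PySem.Str.split₀ (PySem.Str.lower fnp.1)).filter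
                      (fun w => PySem.Str.isIn q w)) ≠ [] then st.1 + 1 else st.1
        let names :=
          if qsplit.length > 1 ∧ l > 1 then st.2 ++ [PySem.Dict.getD ⟨fnp.2⟩ "path" ""]
          else if qsplit.length = 1 ∧ l > 0 then st.2 ++ [PySem.Dict.getD ⟨fnp.2⟩ "path" ""]
          else st.2
        (l, names)) (0, acc)).2) []
  PySem.Set.ofList audio_names

-- ===== PORT B =====
-- Literal port of Source B. `url_fn_dict[fn]` is ported as Dict.get? with default [] — fn is always a key of
-- the dict, so the default is never taken; `['path']` with `getD "" `, never taken under Pre_.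
-- `word_sets[0]` is ported as headD [] — the guard len(qsplit)==1 makes word_sets nonempty there.
def search_algo_alt (query : String) (url_fn_dict : List (String × List (String × String))) : List String :=
  let qsplit := PySem.Str.split₀ query
  let word_sets : List (PySem.Set String) := qsplit.map (fun q =>
    PySem.Set.ofList ((url_fn_dict.filter (fun p =>
      (PySem.Str.split₀ (PySem.Str.lower p.1)).any (fun w => PySem.Str.isIn q w))).map Prod.fst))
  let chosen : PySem.Set String :=
    if qsplit.length = 1 then word_sets.headD []
    else (word_sets.foldl (fun (st : PySem.Set String × PySem.Set String) s =>
            (PySem.Set.union st.1 (PySem.Set.inter s st.2), PySem.Set.union st.2 s))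
          (PySem.Set.empty, PySem.Set.empty)).1
  PySem.Set.ofList ((url_fn_dict.filter (fun p => PySem.Set.contains chosen p.1)).map
    (fun p => PySem.Dict.getD
      ⟨((PySem.Dict.get? (⟨url_fn_dict⟩ : PySem.Dict String (List (String × String))) p.1).getD [])⟩
      "path" ""))

-- ===== PRECONDITION & SPEC =====
-- helpers for Pre_ only: number of query words matching some lowercased word of fn, and the required threshold
def pvCount_search_algo (query fn : String) : Nat :=
  ((PySem.Str.split₀ query).filter (fun q =>
    (PySem.Str.split₀ (PySem.Str.lower fn)).any (fun w => PySem.Str.isIn q w))).length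
def pvNeed_search_algo (query : String) : Nat :=
  if (PySem.Str.split₀ query).length > 1 then 2 else 1

-- url_fn_dict is a Python dict, so its keys are distinct (representation invariant of the association
-- list); Pre_ further excludes exactly the inputs where an entry meeting the match threshold lacks the
-- 'path' key, on which A raises KeyError.
def Pre_search_algo (query : String) (url_fn_dict : List (String × List (String × String))) : Prop :=
  (url_fn_dict.map Prod.fst).Nodup ∧
  ∀ p ∈ url_fn_dict, pvNeed_search_algo query ≤ pvCount_search_algo query p.1 →
    (PySem.Dict.contains (⟨p.2⟩ : PySem.Dict String String) "path") = true
instance (query : String) (url_fn_dict : List (String × List (String × String))) : Decidable (Pre_search_algo query url_fn_dict) := by unfold Pre_search_algo; infer_instance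

def pvWitness_search_algo : String × (List (String × List (String × String))) :=
  ("song a", [("my song.mp3", [("path", "/m/song.mp3")]), ("other", [("x", "y")])])

def Spec_search_algo (query : String) (url_fn_dict : List (String × List (String × String))) (out : List String) : Prop := out = search_algo_alt query url_fn_dict
instance (query : String) (url_fn_dict : List (String × List (String × String))) (out : List String) : Decidable (Spec_search_algo query url_fn_dict out) := by unfold Spec_search_algo; infer_instance

-- ===== CLAIM (what is proved, stated in full; the proofs are below) =====
def Claim_equal_search_algo : Prop := ∀ (query : String) (url_fn_dict : List (String × List (String × String))), Dom_search_algo query url_fn_dict → Pre_search_algo query url_fn_dict → Spec_search_algo query url_fn_dict (search_algo query url_fn_dict)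

-- ===== LEMMAS AND PROOFS =====

theorem pv_add_idem {α : Type} [BEq α] [LawfulBEq α] (s : PySem.Set α) (x : α) :
    PySem.Set.add (PySem.Set.add s x) x = PySem.Set.add s x := by
  simp [PySem.Set.add]
  split_ifs with h
  · exact h
  · simp at h ⊢

theorem pv_foldl_add_replicate {α : Type} [BEq α] [LawfulBEq α] (k : Nat) (s : PySem.Set α) (x : α) :
    List.foldl PySem.Set.add s (List.replicate (k + 1) x) = PySem.Set.add s x := by
  induction k generalizing s with
  | zero => rfl
  | succ k ih =>
      have : List.replicate (k + 1 + 1) x = x :: List.replicate (k + 1) x := rfl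
      rw [this, List.foldl_cons, ih, pv_add_idem]

theorem pv_ofList_append_replicate {α : Type} [BEq α] [LawfulBEq α] (acc : List α) (k : Nat) (x : α) :
    PySem.Set.ofList (acc ++ List.replicate k x)
      = if k = 0 then PySem.Set.ofList acc else PySem.Set.add (PySem.Set.ofList acc) x := by
  rw [PySem.Set.ofList_eq_foldl, List.foldl_append, ← PySem.Set.ofList_eq_foldl]
  cases k with
  | zero => simp
  | succ k => simp [pv_foldl_add_replicate]

-- the per-word match predicate
def pvMatch (q fn : String) : Bool :=
  (PySem.Str.split₀ (PySem.Str.lower fn)).any (fun w => PySem.Str.isIn q w)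

-- proof-side views of A's port (definitionally equal)
def pvF (query : String) (fnp : String × List (String × String)) :
    (Nat × List String) → String → (Nat × List String) := fun st q =>
  let l := if ((PySem.Str.split₀ (PySem.Str.lower fnp.1)).filter
                (fun w => PySem.Str.isIn q w)) ≠ [] then st.1 + 1 else st.1
  let names :=
    if (PySem.Str.split₀ query).length > 1 ∧ l > 1 then st.2 ++ [PySem.Dict.getD ⟨fnp.2⟩ "path" ""]
    else if (PySem.Str.split₀ query).length = 1 ∧ l > 0 then st.2 ++ [PySem.Dict.getD ⟨fnp.2⟩ "path" ""]
    else st.2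
  (l, names)

def pvPath (fnp : String × List (String × String)) : String := PySem.Dict.getD ⟨fnp.2⟩ "path" ""

def pvA (query : String) (ps : List (String × List (String × String))) (acc : List String) : List String :=
  ps.foldl (fun acc fnp => ((PySem.Str.split₀ query).foldl (pvF query fnp) (0, acc)).2) acc

-- the common "counted threshold" normal form both ports are reduced to
def pvN (query : String) (ps : List (String × List (String × String))) (s : List String) : List String :=
  ps.foldl (fun paths fnp =>
    if pvNeed_search_algo query ≤ pvCount_search_algo query fnp.1
    then PySem.Set.add paths (pvPath fnp) else paths) s

theorem pvA_eq (query : String) (ufd : List (String × List (String × String))) :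
    search_algo query ufd = PySem.Set.ofList (pvA query ufd []) := rfl

-- count of matching words of qs for filename fn
def pvCnt (fn : String) (qs : List String) : Nat :=
  (qs.filter (fun q => (PySem.Str.split₀ (PySem.Str.lower fn)).any (fun w => PySem.Str.isIn q w))).length

theorem pvCnt_cons (fn q : String) (rest : List String) :
    pvCnt fn (q :: rest)
      = (if ((PySem.Str.split₀ (PySem.Str.lower fn)).filter (fun w => PySem.Str.isIn q w)) ≠ [] then 1 else 0)
        + pvCnt fn rest := by
  simp only [pvCnt, List.filter_cons]
  split_ifs with h1 h2 h2
  all_goals simp_all [List.filter_eq_nil_iff, List.any_eq_true]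
  all_goals omega

theorem pvCnt_le (fn : String) (qs : List String) : pvCnt fn qs ≤ qs.length :=
  List.length_filter_le _ _

theorem pv_inner_multi (query : String) (fnp : String × List (String × String))
    (hlen : 1 < (PySem.Str.split₀ query).length) :
    ∀ (qs : List String) (l0 : Nat) (names : List String),
    ∃ k : Nat, (qs.foldl (pvF query fnp) (l0, names)).2 = names ++ List.replicate k (pvPath fnp)
      ∧ (k ≠ 0 ↔ 2 ≤ l0 + pvCnt fnp.1 qs ∧ 0 < qs.length) := by
  intro qs
  induction qs with
  | nil => intro l0 names; exact ⟨0, by simp, by simp⟩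
  | cons q rest ih =>
      intro l0 names
      rw [List.foldl_cons]
      have hstep : pvF query fnp (l0, names) q
          = (if ((PySem.Str.split₀ (PySem.Str.lower fnp.1)).filter (fun w => PySem.Str.isIn q w)) ≠ []
               then l0 + 1 else l0,
             names ++ List.replicate
               (if 1 < (if ((PySem.Str.split₀ (PySem.Str.lower fnp.1)).filter (fun w => PySem.Str.isIn q w)) ≠ []
                         then l0 + 1 else l0) then 1 else 0) (pvPath fnp)) := by
        simp only [pvF, pvPath]
        split_ifs with hm h1 h1 <;> simp_all
      rw [hstep]
      by_cases hm : ((PySem.Str.split₀ (PySem.Str.lower fnp.1)).filter (fun w => PySem.Str.isIn q w)) ≠ []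
      · simp only [if_pos hm]
        obtain ⟨k', h2, h3⟩ := ih (l0 + 1) (names ++ List.replicate (if 1 < l0 + 1 then 1 else 0) (pvPath fnp))
        refine ⟨(if 1 < l0 + 1 then 1 else 0) + k', ?_, ?_⟩
        · rw [h2, List.append_assoc, ← List.replicate_append_replicate]
        · rw [pvCnt_cons, if_pos hm]
          have hle := pvCnt_le fnp.1 rest
          simp only [List.length_cons]
          split_ifs with hl <;> omega
      · simp only [if_neg hm]
        obtain ⟨k', h2, h3⟩ := ih l0 (names ++ List.replicate (if 1 < l0 then 1 else 0) (pvPath fnp))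
        refine ⟨(if 1 < l0 then 1 else 0) + k', ?_, ?_⟩
        · rw [h2, List.append_assoc, ← List.replicate_append_replicate]
        · rw [pvCnt_cons, if_neg hm]
          have hle := pvCnt_le fnp.1 rest
          simp only [List.length_cons]
          split_ifs with hl <;> omega

-- A reduces to the counted-threshold normal form
theorem pv_outer (query : String) :
    ∀ (ps : List (String × List (String × String))) (acc : List String),
    PySem.Set.ofList (pvA query ps acc) = pvN query ps (PySem.Set.ofList acc) := by
  intro ps
  induction ps with
  | nil => intro acc; rfl
  | cons fnp ps ih =>
      intro acc
      have hstep : ∃ k : Nat,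
          ((PySem.Str.split₀ query).foldl (pvF query fnp) (0, acc)).2
            = acc ++ List.replicate k (pvPath fnp)
          ∧ (k ≠ 0 ↔ pvNeed_search_algo query ≤ pvCount_search_algo query fnp.1) := by
        have hcount : pvCount_search_algo query fnp.1 = pvCnt fnp.1 (PySem.Str.split₀ query) := rfl
        rcases hq : PySem.Str.split₀ query with _ | ⟨q, rest⟩
        · refine ⟨0, by simp, ?_⟩
          simp [pvNeed_search_algo, pvCount_search_algo, hq]
        · rcases rest with _ | ⟨q2, rest2⟩
          · -- single-word query
            refine ⟨if ((PySem.Str.split₀ (PySem.Str.lower fnp.1)).filter (fun w => PySem.Str.isIn q w)) ≠ [] then 1 else 0, ?_, ?_⟩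
            · rw [List.foldl_cons, List.foldl_nil]
              simp only [pvF, pvPath, hq]
              split_ifs <;> simp_all
            · rw [hcount, hq, pvCnt_cons]
              have hnil : pvCnt fnp.1 [] = 0 := rfl
              simp only [pvNeed_search_algo, hq]
              split_ifs <;> simp_all
          · -- multi-word query
            have hlen : 1 < (PySem.Str.split₀ query).length := by rw [hq]; simp
            obtain ⟨k, h2, h3⟩ := pv_inner_multi query fnp hlen (q :: q2 :: rest2) 0 acc
            refine ⟨k, h2, ?_⟩
            have hneed : pvNeed_search_algo query = 2 := by
              simp only [pvNeed_search_algo]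
              rw [if_pos hlen]
            rw [hq] at hcount
            rw [h3, hcount, hneed]
            simp only [List.length_cons]
            omega
      obtain ⟨k, h2, h3⟩ := hstep
      show PySem.Set.ofList (pvA query ps (((PySem.Str.split₀ query).foldl (pvF query fnp) (0, acc)).2))
            = pvN query ps (if pvNeed_search_algo query ≤ pvCount_search_algo query fnp.1
                            then PySem.Set.add (PySem.Set.ofList acc) (pvPath fnp) else PySem.Set.ofList acc)
      rw [h2, ih, pv_ofList_append_replicate]
      by_cases hk : k = 0
      · rw [if_pos hk, if_neg (by rw [← h3]; simp [hk])]
      · rw [if_neg hk, if_pos (h3.mp hk)]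

-- ============ B side ============

def pvKeys (ufd : List (String × List (String × String))) : List String := ufd.map Prod.fst

def pvS (ufd : List (String × List (String × String))) (q : String) : PySem.Set String :=
  PySem.Set.ofList ((ufd.filter (fun p =>
    (PySem.Str.split₀ (PySem.Str.lower p.1)).any (fun w => PySem.Str.isIn q w))).map Prod.fst)

theorem pv_mem_S (ufd : List (String × List (String × String))) (q fn : String) :
    fn ∈ pvS ufd q ↔ fn ∈ pvKeys ufd ∧ pvMatch q fn = true := by
  simp only [pvS, PySem.Set.mem_ofList, List.mem_map, List.mem_filter, pvKeys, pvMatch]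
  constructor
  · rintro ⟨p, ⟨hp, hm⟩, rfl⟩; exact ⟨⟨p, hp, rfl⟩, hm⟩
  · rintro ⟨⟨p, hp, rfl⟩, hm⟩; exact ⟨p, ⟨hp, hm⟩, rfl⟩

theorem pvCnt_as_match (fn : String) (qs : List String) :
    pvCnt fn qs = (qs.filter (fun q => pvMatch q fn)).length := rfl

-- the accumulating pairwise-overlap fold computes "matched by ≥2 / ≥1 words"
theorem pv_fold_sets (ufd : List (String × List (String × String))) :
    ∀ (qs : List String) (c : String → Nat) (st : PySem.Set String × PySem.Set String),
    (∀ fn, fn ∈ st.1 ↔ fn ∈ pvKeys ufd ∧ 2 ≤ c fn) →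
    (∀ fn, fn ∈ st.2 ↔ fn ∈ pvKeys ufd ∧ 1 ≤ c fn) →
    ∀ fn,
      (fn ∈ (qs.foldl (fun (st : PySem.Set String × PySem.Set String) q =>
          (PySem.Set.union st.1 (PySem.Set.inter (pvS ufd q) st.2),
           PySem.Set.union st.2 (pvS ufd q))) st).1
        ↔ fn ∈ pvKeys ufd ∧ 2 ≤ c fn + pvCnt fn qs) := by
  intro qs
  induction qs with
  | nil =>
      intro c st h1 _ fn
      simpa [pvCnt] using h1 fn
  | cons q rest ih =>
      intro c st h1 h2 fn
      rw [List.foldl_cons]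
      have hc : ∀ g, pvCnt g (q :: rest)
          = (if pvMatch q g = true then 1 else 0) + pvCnt g rest := by
        intro g
        simp only [pvCnt_as_match, List.filter_cons]
        split_ifs with h
        · simp_all
          omega
        · simp_all
      have := ih (fun g => c g + if pvMatch q g = true then 1 else 0)
        (PySem.Set.union st.1 (PySem.Set.inter (pvS ufd q) st.2),
         PySem.Set.union st.2 (pvS ufd q))
        (by
          intro g
          simp only [PySem.Set.mem_union, PySem.Set.mem_inter, pv_mem_S, h1 g, h2 g]
          constructor
          · rintro (⟨hk, h⟩ | ⟨⟨hk, hm⟩, _, h⟩)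
            · exact ⟨hk, by split_ifs <;> omega⟩
            · exact ⟨hk, by simp [hm]; omega⟩
          · rintro ⟨hk, h⟩
            by_cases hm : pvMatch q g = true
            · simp only [if_pos hm] at h
              by_cases h2c : 2 ≤ c g
              · exact Or.inl ⟨hk, h2c⟩
              · exact Or.inr ⟨⟨hk, hm⟩, hk, by omega⟩
            · simp only [if_neg hm] at h
              exact Or.inl ⟨hk, by omega⟩)
        (by
          intro g
          simp only [PySem.Set.mem_union, pv_mem_S, h2 g]
          constructor
          · rintro (⟨hk, h⟩ | ⟨hk, hm⟩)
            · exact ⟨hk, by split_ifs <;> omega⟩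
            · exact ⟨hk, by simp [hm]⟩
          · rintro ⟨hk, h⟩
            by_cases hm : pvMatch q g = true
            · exact Or.inr ⟨hk, hm⟩
            · simp only [if_neg hm] at h; exact Or.inl ⟨hk, h⟩)
        fn
      rw [this, hc fn]
      constructor <;> (rintro ⟨hk, h⟩; exact ⟨hk, by omega⟩)

-- membership in B's `chosen` is exactly the counted threshold
theorem pv_mem_chosen (query : String) (ufd : List (String × List (String × String))) (fn : String) :
    (fn ∈ (if (PySem.Str.split₀ query).length = 1
             then ((PySem.Str.split₀ query).map (pvS ufd)).headD []
             else (((PySem.Str.split₀ query).map (pvS ufd)).foldl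
                     (fun (st : PySem.Set String × PySem.Set String) s =>
                       (PySem.Set.union st.1 (PySem.Set.inter s st.2), PySem.Set.union st.2 s))
                     (PySem.Set.empty, PySem.Set.empty)).1)
      ↔ fn ∈ pvKeys ufd ∧ pvNeed_search_algo query ≤ pvCount_search_algo query fn) := by
  have hcount : pvCount_search_algo query fn = pvCnt fn (PySem.Str.split₀ query) := rfl
  by_cases h1 : (PySem.Str.split₀ query).length = 1
  · rw [if_pos h1]
    rcases hq : PySem.Str.split₀ query with _ | ⟨q, rest⟩
    · rw [hq] at h1; simp at h1
    · have hr : rest = [] := by rw [hq] at h1; simpa using h1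
      subst hr
      simp only [List.map_cons, List.map_nil, List.headD_cons]
      rw [pv_mem_S]
      have hneed : pvNeed_search_algo query = 1 := by
        simp only [pvNeed_search_algo, hq]; rfl
      rw [hneed, hcount, hq]
      have : pvCnt fn [q] = if pvMatch q fn = true then 1 else 0 := by
        simp only [pvCnt_as_match, List.filter_cons, List.filter_nil]
        split_ifs <;> simp_all
      rw [this]
      constructor
      · rintro ⟨hk, hm⟩; exact ⟨hk, by simp [hm]⟩
      · rintro ⟨hk, h⟩
        refine ⟨hk, ?_⟩
        by_cases hm : pvMatch q fn = true
        · exact hm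
        · simp [hm] at h
  · rw [if_neg h1]
    rw [List.foldl_map]
    have := pv_fold_sets ufd (PySem.Str.split₀ query) (fun _ => 0)
      (PySem.Set.empty, PySem.Set.empty)
      (by intro g; simp [PySem.Set.empty]) (by intro g; simp [PySem.Set.empty]) fn
    rw [this, hcount]
    rcases hq : PySem.Str.split₀ query with _ | ⟨q, rest⟩
    · simp [pvNeed_search_algo, pvCnt, hq]
    · have hlen : 1 < (PySem.Str.split₀ query).length := by
        rw [hq]
        rw [hq] at h1
        simp only [List.length_cons] at h1 ⊢
        omega
      have : pvNeed_search_algo query = 2 := by simp only [pvNeed_search_algo]; rw [if_pos hlen]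
      rw [this]
      constructor <;> (rintro ⟨hk, h⟩; exact ⟨hk, by omega⟩)

-- under Nodup keys the dict lookup returns the entry's own payload
theorem pv_lookup_eq (ufd : List (String × List (String × String)))
    (hnd : (ufd.map Prod.fst).Nodup) (p : String × List (String × String)) (hp : p ∈ ufd) :
    PySem.Dict.get? (⟨ufd⟩ : PySem.Dict String (List (String × String))) p.1 = some p.2 := by
  have : ((⟨ufd⟩ : PySem.Dict String (List (String × String))).keys).Nodup := hnd
  exact PySem.Dict.get?_of_mem_items (d := ⟨ufd⟩) (k := p.1) (v := p.2) hp this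

-- B reduces to the same counted-threshold normal form
theorem pvB_normal (query : String) (ufd : List (String × List (String × String)))
    (hnd : (ufd.map Prod.fst).Nodup) :
    search_algo_alt query ufd = pvN query ufd PySem.Set.empty := by
  show PySem.Set.ofList ((ufd.filter (fun p => PySem.Set.contains
      (if (PySem.Str.split₀ query).length = 1
        then ((PySem.Str.split₀ query).map (pvS ufd)).headD []
        else (((PySem.Str.split₀ query).map (pvS ufd)).foldl
                (fun (st : PySem.Set String × PySem.Set String) s =>
                  (PySem.Set.union st.1 (PySem.Set.inter s st.2), PySem.Set.union st.2 s))
                (PySem.Set.empty, PySem.Set.empty)).1) p.1)).map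
      (fun p => PySem.Dict.getD
        ⟨((PySem.Dict.get? (⟨ufd⟩ : PySem.Dict String (List (String × String))) p.1).getD [])⟩
        "path" "")) = pvN query ufd PySem.Set.empty
  rw [PySem.Set.ofList_eq_foldl, List.foldl_map, List.foldl_filter]
  unfold pvN
  apply PySem.List.foldl_congr_mem
  intro paths p hp
  have hmem := pv_mem_chosen query ufd p.1
  have hkey : p.1 ∈ pvKeys ufd := List.mem_map_of_mem hp
  have hpath : PySem.Dict.getD
      ⟨((PySem.Dict.get? (⟨ufd⟩ : PySem.Dict String (List (String × String))) p.1).getD [])⟩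
      "path" "" = pvPath p := by
    rw [pv_lookup_eq ufd hnd p hp]; rfl
  by_cases hc : pvNeed_search_algo query ≤ pvCount_search_algo query p.1
  · have : PySem.Set.contains
        (if (PySem.Str.split₀ query).length = 1
          then ((PySem.Str.split₀ query).map (pvS ufd)).headD []
          else (((PySem.Str.split₀ query).map (pvS ufd)).foldl
                  (fun (st : PySem.Set String × PySem.Set String) s =>
                    (PySem.Set.union st.1 (PySem.Set.inter s st.2), PySem.Set.union st.2 s))
                  (PySem.Set.empty, PySem.Set.empty)).1) p.1 = true := by
      have hin := hmem.mpr ⟨hkey, hc⟩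
      simpa using hin
    rw [this, if_pos hc, hpath]
    simp
  · have : PySem.Set.contains
        (if (PySem.Str.split₀ query).length = 1
          then ((PySem.Str.split₀ query).map (pvS ufd)).headD []
          else (((PySem.Str.split₀ query).map (pvS ufd)).foldl
                  (fun (st : PySem.Set String × PySem.Set String) s =>
                    (PySem.Set.union st.1 (PySem.Set.inter s st.2), PySem.Set.union st.2 s))
                  (PySem.Set.empty, PySem.Set.empty)).1) p.1 = false := by
      have hnot : p.1 ∉ (if (PySem.Str.split₀ query).length = 1
          then ((PySem.Str.split₀ query).map (pvS ufd)).headD []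
          else (((PySem.Str.split₀ query).map (pvS ufd)).foldl
                  (fun (st : PySem.Set String × PySem.Set String) s =>
                    (PySem.Set.union st.1 (PySem.Set.inter s st.2), PySem.Set.union st.2 s))
                  (PySem.Set.empty, PySem.Set.empty)).1) :=
        fun hcon => hc (hmem.mp hcon).2
      simpa using hnot
    rw [this, if_neg hc]
    simp

-- ===== VERDICT (by name: the statement is the Claim_ definition above) =====
theorem search_algo_spec : Claim_equal_search_algo := by
  intro query ufd _ hpre
  unfold Spec_search_algo
  rw [pvA_eq, pv_outer, pvB_normal query ufd hpre.1]
  rfl
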